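-- pv_equiv track=rewrite | github.com/marcogarofal/exhaustive-algorithm-vs-greedy-virtual-network_private | random_graph35_versione_publbica.py | remove_trees_where_discretionary_not_connected_to_discretionary_or_mandatory
-- ===== SOURCE A (Python) =====
-- def remove_trees_where_discretionary_not_connected_to_discretionary_or_mandatory(edges, power_nodes_mandatory, power_nodes_discretionary):
--     graph = {}
--     # Build the graph represented as an adjacency dictionary
--     for edge in edges:
--         u, v = edge
--         if u not in graph:
--             graph[u] = []
--         if v not in graph:
--             graph[v] = []
--         graph[u].append(v)
--         graph[v].append(u)
--
--     # Recursive depth-first search function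
--     def dfs(graph, node, visited):
--         visited.add(node)
--         for neighbor in graph[node]:
--             if neighbor not in visited:
--                 dfs(graph, neighbor, visited)
--
--     # Check connectivity between mandatory and discretionary nodes
--     visited_nodes = set()
--     for node in power_nodes_mandatory:
--         if node not in visited_nodes:
--             dfs(graph, node, visited_nodes)
--
--     return all(node in visited_nodes for node in power_nodes_discretionary if node in graph)
-- ===== SOURCE B (Python) =====
-- def remove_trees_where_discretionary_not_connected_to_discretionary_or_mandatory(edges, power_nodes_mandatory, power_nodes_discretionary):
--     graph = {}
--     # Build the graph represented as an adjacency dictionary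
--     for edge in edges:
--         u, v = edge
--         if u not in graph:
--             graph[u] = []
--         if v not in graph:
--             graph[v] = []
--         graph[u].append(v)
--         graph[v].append(u)
--
--     # Iterative breadth-first search by levels instead of recursive DFS
--     visited_nodes = set()
--     for start in power_nodes_mandatory:
--         if start not in visited_nodes:
--             visited_nodes.add(start)
--             frontier = [start]
--             while frontier:
--                 next_frontier = []
--                 for node in frontier:
--                     for neighbor in graph[node]:
--                         if neighbor not in visited_nodes:
--                             visited_nodes.add(neighbor)
--                             next_frontier.append(neighbor)
--                 frontier = next_frontier
--
--     return all(node in visited_nodes for node in power_nodes_discretionary if node in graph)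
-- ===== Notes on version B (the rewrite author's own statement) =====
-- stated objective: alternative
-- what changed: The recursive depth-first search helper is replaced by an iterative level-by-level breadth-first search (an explicit frontier list, no recursion); graph construction and the final all-check are unchanged.
import Mathlib
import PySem

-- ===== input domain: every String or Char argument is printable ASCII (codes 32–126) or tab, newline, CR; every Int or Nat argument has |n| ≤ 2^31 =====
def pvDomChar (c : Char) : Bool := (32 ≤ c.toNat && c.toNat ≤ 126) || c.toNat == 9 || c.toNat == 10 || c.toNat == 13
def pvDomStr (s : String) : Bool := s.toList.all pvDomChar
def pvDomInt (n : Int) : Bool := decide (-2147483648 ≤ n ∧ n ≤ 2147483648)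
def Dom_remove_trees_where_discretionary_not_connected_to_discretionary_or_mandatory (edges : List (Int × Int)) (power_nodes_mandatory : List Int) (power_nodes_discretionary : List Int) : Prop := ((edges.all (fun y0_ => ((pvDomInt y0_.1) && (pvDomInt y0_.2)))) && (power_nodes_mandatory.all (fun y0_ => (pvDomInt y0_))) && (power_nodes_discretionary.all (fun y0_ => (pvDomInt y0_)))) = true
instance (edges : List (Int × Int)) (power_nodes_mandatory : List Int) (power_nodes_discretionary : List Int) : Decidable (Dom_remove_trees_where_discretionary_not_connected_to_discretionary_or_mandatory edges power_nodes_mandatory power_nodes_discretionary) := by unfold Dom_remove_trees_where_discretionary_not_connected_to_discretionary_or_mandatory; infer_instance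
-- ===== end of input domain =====

-- B replaces the recursive depth-first search with an iterative level-by-level breadth-first
-- search (explicit frontier list, no recursion); graph construction and the final check are unchanged.


-- ===== PORT A =====
-- adjacency-dict construction: this loop is textually identical in A and B, so both ports share it
def pvGraphStep (g : PySem.Dict Int (List Int)) (e : Int × Int) : PySem.Dict Int (List Int) :=
  let g1 := if g.contains e.1 then g else g.insert e.1 []
  let g2 := if g1.contains e.2 then g1 else g1.insert e.2 []
  let g3 := g2.modify e.1 [] (fun l => l ++ [e.2])     -- graph[u].append(v)
  g3.modify e.2 [] (fun l => l ++ [e.1])               -- graph[v].append(u)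

def pvGraph (edges : List (Int × Int)) : PySem.Dict Int (List Int) :=
  edges.foldl pvGraphStep PySem.Dict.empty

-- fuel for the hand-ported loops: strictly more than the number of graph keys (≤ 2·|edges|),
-- which is proved below to make the fueled loops exact wherever the Python terminates
def pvFuel (edges : List (Int × Int)) : Nat := 2 * edges.length + 2

-- A's recursive dfs; fuel only bounds the recursion depth (exact: depth is at most the
-- number of graph keys, see pvCnt lemmas below); `get? = none` is Python's KeyError, outside Pre_
def pvDfsA (g : PySem.Dict Int (List Int)) : Nat → Int → PySem.Set Int → PySem.Set Int
  | 0, _, visited => visited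
  | Nat.succ f, node, visited =>
    let visited1 := PySem.Set.add visited node
    match PySem.Dict.get? g node with
    | none => visited1
    | some ns => ns.foldl (fun vis nb => if PySem.Set.contains vis nb then vis else pvDfsA g f nb vis) visited1

def remove_trees_where_discretionary_not_connected_to_discretionary_or_mandatory (edges : List (Int × Int)) (power_nodes_mandatory : List Int) (power_nodes_discretionary : List Int) : Bool :=
  let graph := pvGraph edges
  let visited_nodes := power_nodes_mandatory.foldl
    (fun vis node => if PySem.Set.contains vis node then vis else pvDfsA graph (pvFuel edges) node vis)
    PySem.Set.empty
  (power_nodes_discretionary.filter (fun node => PySem.Dict.contains graph node)).all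
    (fun node => PySem.Set.contains visited_nodes node)

-- ===== PORT B =====
-- one BFS round: visit the neighbours of every frontier node, collecting the next frontier;
-- `get? = none` is Python's KeyError, outside Pre_
def pvBfsRound (g : PySem.Dict Int (List Int)) (visited : PySem.Set Int) (frontier : List Int) : PySem.Set Int × List Int :=
  frontier.foldl
    (fun st node =>
      match PySem.Dict.get? g node with
      | none => st
      | some ns => ns.foldl
          (fun st nb => if PySem.Set.contains st.1 nb then st else (PySem.Set.add st.1 nb, st.2 ++ [nb]))
          st)
    (visited, [])

-- the `while frontier:` loop; fuel bounds the number of rounds (exact: at most #keys+1 productive rounds)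
def pvBfsLoop (g : PySem.Dict Int (List Int)) : Nat → PySem.Set Int → List Int → PySem.Set Int
  | 0, visited, _ => visited
  | Nat.succ f, visited, frontier =>
    if frontier.isEmpty then visited
    else
      let st := pvBfsRound g visited frontier
      pvBfsLoop g f st.1 st.2

def remove_trees_where_discretionary_not_connected_to_discretionary_or_mandatory_alt (edges : List (Int × Int)) (power_nodes_mandatory : List Int) (power_nodes_discretionary : List Int) : Bool :=
  let graph := pvGraph edges
  let visited_nodes := power_nodes_mandatory.foldl
    (fun vis start => if PySem.Set.contains vis start then vis
                      else pvBfsLoop graph (pvFuel edges) (PySem.Set.add vis start) [start])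
    PySem.Set.empty
  (power_nodes_discretionary.filter (fun node => PySem.Dict.contains graph node)).all
    (fun node => PySem.Set.contains visited_nodes node)

-- ===== PRECONDITION & SPEC =====
-- Pre_ excludes exactly the inputs where some mandatory node has no incident edge: there both
-- Pythons raise KeyError (graph[node] on a node absent from the adjacency dict).
def Pre_remove_trees_where_discretionary_not_connected_to_discretionary_or_mandatory (edges : List (Int × Int)) (power_nodes_mandatory : List Int) (power_nodes_discretionary : List Int) : Prop :=
  ∀ m ∈ power_nodes_mandatory, ∃ e ∈ edges, m = e.1 ∨ m = e.2
instance (edges : List (Int × Int)) (power_nodes_mandatory : List Int) (power_nodes_discretionary : List Int) : Decidable (Pre_remove_trees_where_discretionary_not_connected_to_discretionary_or_mandatory edges power_nodes_mandatory power_nodes_discretionary) := by unfold Pre_remove_trees_where_discretionary_not_connected_to_discretionary_or_mandatory; infer_instance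

def pvWitness_remove_trees_where_discretionary_not_connected_to_discretionary_or_mandatory : (List (Int × Int)) × List Int × List Int := ([(1, 2), (2, 3)], [1], [3, 4])

def Spec_remove_trees_where_discretionary_not_connected_to_discretionary_or_mandatory (edges : List (Int × Int)) (power_nodes_mandatory : List Int) (power_nodes_discretionary : List Int) (out : Bool) : Prop := out = remove_trees_where_discretionary_not_connected_to_discretionary_or_mandatory_alt edges power_nodes_mandatory power_nodes_discretionary
instance (edges : List (Int × Int)) (power_nodes_mandatory : List Int) (power_nodes_discretionary : List Int) (out : Bool) : Decidable (Spec_remove_trees_where_discretionary_not_connected_to_discretionary_or_mandatory edges power_nodes_mandatory power_nodes_discretionary out) := by unfold Spec_remove_trees_where_discretionary_not_connected_to_discretionary_or_mandatory; infer_instance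

-- ===== CLAIM (what is proved, stated in full; the proofs are below) =====
def Claim_equal_remove_trees_where_discretionary_not_connected_to_discretionary_or_mandatory : Prop := ∀ (edges : List (Int × Int)) (power_nodes_mandatory : List Int) (power_nodes_discretionary : List Int), Dom_remove_trees_where_discretionary_not_connected_to_discretionary_or_mandatory edges power_nodes_mandatory power_nodes_discretionary → Pre_remove_trees_where_discretionary_not_connected_to_discretionary_or_mandatory edges power_nodes_mandatory power_nodes_discretionary → Spec_remove_trees_where_discretionary_not_connected_to_discretionary_or_mandatory edges power_nodes_mandatory power_nodes_discretionary (remove_trees_where_discretionary_not_connected_to_discretionary_or_mandatory edges power_nodes_mandatory power_nodes_discretionary)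

-- ===== LEMMAS AND PROOFS =====

-- adjacency list of a node (graph.get(x, []))
def pvAdj (g : PySem.Dict Int (List Int)) (x : Int) : List Int := PySem.Dict.getD g x []

-- reachability along adjacency lists
def pvReach (g : PySem.Dict Int (List Int)) (s x : Int) : Prop :=
  Relation.ReflTransGen (fun a b => b ∈ pvAdj g a) s x

-- number of not-yet-visited graph keys (the fuel measure)
def pvCnt (g : PySem.Dict Int (List Int)) (vis : PySem.Set Int) : Nat :=
  g.keys.countP (fun k => !(PySem.Set.contains vis k))

lemma pvContains_step (g : PySem.Dict Int (List Int)) (e : Int × Int) (x : Int) :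
    (pvGraphStep g e).contains x = true ↔ x = e.1 ∨ x = e.2 ∨ g.contains x = true := by
  simp only [pvGraphStep, PySem.Dict.contains_modify]
  split_ifs with h1 h2 h2 <;>
    simp [PySem.Dict.contains_insert, Bool.or_eq_true, beq_iff_eq] <;> tauto

lemma pvAdj_step (g : PySem.Dict Int (List Int)) (e : Int × Int) (x y : Int)
    (hy : y ∈ pvAdj (pvGraphStep g e) x) : y = e.1 ∨ y = e.2 ∨ y ∈ pvAdj g x := by
  obtain ⟨u, v⟩ := e
  simp only [pvGraphStep, pvAdj, PySem.Dict.getD_modify] at hy ⊢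
  split_ifs at hy <;>
    (try simp only [PySem.Dict.getD_insert] at hy) <;>
    (try split_ifs at hy) <;>
    (try simp only [List.mem_append, List.mem_singleton, List.not_mem_nil] at hy) <;>
    subst_vars <;> tauto

lemma pvGraph_contains_aux (es : List (Int × Int)) :
  ∀ (g : PySem.Dict Int (List Int)) (x : Int),
    (es.foldl pvGraphStep g).contains x = true ↔ g.contains x = true ∨ ∃ e ∈ es, x = e.1 ∨ x = e.2 := by
  induction es with
  | nil => simp
  | cons e es ih =>
    intro g x
    rw [List.foldl_cons, ih, pvContains_step]
    constructor
    · rintro ((h | h | h) | ⟨e', he', h⟩)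
      · exact Or.inr ⟨e, List.mem_cons_self .., Or.inl h⟩
      · exact Or.inr ⟨e, List.mem_cons_self .., Or.inr h⟩
      · exact Or.inl h
      · exact Or.inr ⟨e', List.mem_cons_of_mem _ he', h⟩
    · rintro (h | ⟨e', he', h⟩)
      · exact Or.inl (Or.inr (Or.inr h))
      · rcases List.mem_cons.1 he' with rfl | he'
        · exact Or.inl (by tauto)
        · exact Or.inr ⟨e', he', h⟩

lemma pvGraph_contains (edges : List (Int × Int)) (x : Int) :
    (pvGraph edges).contains x = true ↔ ∃ e ∈ edges, x = e.1 ∨ x = e.2 := by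
  rw [pvGraph, pvGraph_contains_aux]
  simp [PySem.Dict.contains_empty]

lemma pvGraph_KC_aux (es : List (Int × Int)) :
  ∀ (g : PySem.Dict Int (List Int)),
    (∀ x y, y ∈ pvAdj g x → g.contains y = true) →
    ∀ x y, y ∈ pvAdj (es.foldl pvGraphStep g) x → (es.foldl pvGraphStep g).contains y = true := by
  induction es with
  | nil => intro g h; simpa using h
  | cons e es ih =>
    intro g h
    simp only [List.foldl_cons]
    refine ih _ ?_
    intro x y hy
    rcases pvAdj_step g e x y hy with h' | h' | h'
    · exact (pvContains_step g e y).2 (Or.inl h')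
    · exact (pvContains_step g e y).2 (Or.inr (Or.inl h'))
    · exact (pvContains_step g e y).2 (Or.inr (Or.inr (h _ _ h')))

lemma pvGraph_KC (edges : List (Int × Int)) :
    ∀ x y, y ∈ pvAdj (pvGraph edges) x → (pvGraph edges).contains y = true := by
  refine pvGraph_KC_aux edges PySem.Dict.empty ?_
  intro x y hy
  simp [pvAdj, PySem.Dict.getD_empty] at hy

lemma pvKeys_step_len (g : PySem.Dict Int (List Int)) (e : Int × Int) :
    (pvGraphStep g e).keys.length ≤ g.keys.length + 2 := by
  have h1 : ∀ (d : PySem.Dict Int (List Int)) (k : Int) (v : List Int),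
      (d.insert k v).keys.length ≤ d.keys.length + 1 := by
    intro d k v
    by_cases h : d.contains k = true
    · rw [PySem.Dict.keys_insert_of_contains d v h]; omega
    · rw [PySem.Dict.keys_insert_of_not_contains d v (by simpa using h)]
      simp
  have h2 : ∀ (d : PySem.Dict Int (List Int)) (k : Int) (f : List Int → List Int),
      d.contains k = true → (d.modify k [] f).keys.length = d.keys.length := by
    intro d k f h
    rw [PySem.Dict.keys_modify, PySem.Dict.keys_insert_of_contains _ _ h]
  show ((let g1 := if g.contains e.1 then g else g.insert e.1 []
         let g2 := if g1.contains e.2 then g1 else g1.insert e.2 []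
         let g3 := g2.modify e.1 [] (fun l => l ++ [e.2])
         g3.modify e.2 [] (fun l => l ++ [e.1])).keys.length ≤ g.keys.length + 2)
  set g1 := if g.contains e.1 then g else g.insert e.1 [] with hg1
  set g2 := if g1.contains e.2 then g1 else g1.insert e.2 [] with hg2
  have hc1 : g1.contains e.1 = true := by
    rw [hg1]; split_ifs with h
    · exact h
    · exact PySem.Dict.contains_insert_self g e.1 []
  have hc2 : g2.contains e.2 = true := by
    rw [hg2]; split_ifs with h
    · exact h
    · exact PySem.Dict.contains_insert_self g1 e.2 []
  have hc1' : g2.contains e.1 = true := by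
    rw [hg2]; split_ifs with h
    · exact hc1
    · rw [PySem.Dict.contains_insert]; simp [hc1]
  have hc3 : (g2.modify e.1 [] (fun l => l ++ [e.2])).contains e.2 = true := by
    rw [PySem.Dict.contains_modify]; simp [hc2]
  rw [h2 _ _ _ hc3, h2 _ _ _ hc1']
  have b1 : g1.keys.length ≤ g.keys.length + 1 := by
    rw [hg1]; split_ifs
    · omega
    · exact h1 g e.1 []
  have b2 : g2.keys.length ≤ g1.keys.length + 1 := by
    rw [hg2]; split_ifs
    · omega
    · exact h1 g1 e.2 []
  omega

lemma pvGraph_keys_len_aux (es : List (Int × Int)) :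
    ∀ g : PySem.Dict Int (List Int), (es.foldl pvGraphStep g).keys.length ≤ g.keys.length + 2 * es.length := by
  induction es with
  | nil => simp
  | cons e es ih =>
    intro g
    calc ((e :: es).foldl pvGraphStep g).keys.length
        = (es.foldl pvGraphStep (pvGraphStep g e)).keys.length := by simp
      _ ≤ (pvGraphStep g e).keys.length + 2 * es.length := ih _
      _ ≤ g.keys.length + 2 + 2 * es.length := by have := pvKeys_step_len g e; omega
      _ = g.keys.length + 2 * (es.length + 1) := by ring
      _ = g.keys.length + 2 * (e :: es).length := by simp

lemma pvGraph_keys_len (edges : List (Int × Int)) :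
    (pvGraph edges).keys.length ≤ 2 * edges.length := by
  have := pvGraph_keys_len_aux edges PySem.Dict.empty
  simpa [pvGraph, PySem.Dict.keys_empty] using this

lemma pvCountP_lt {l : List Int} {p q : Int → Bool}
    (h : ∀ a ∈ l, p a = true → q a = true) (a : Int) (ha : a ∈ l)
    (hq : q a = true) (hp : p a = false) : l.countP p < l.countP q := by
  induction l with
  | nil => simp at ha
  | cons b t iht =>
    have hmono : t.countP p ≤ t.countP q :=
      List.countP_mono_left (fun x hx => h x (List.mem_cons_of_mem _ hx))
    rcases List.mem_cons.1 ha with rfl | ha'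
    · rw [List.countP_cons_of_neg (by simp [hp]), List.countP_cons_of_pos hq]
      omega
    · have hlt := iht (fun x hx => h x (List.mem_cons_of_mem _ hx)) ha'
      by_cases hb : p b = true
      · rw [List.countP_cons_of_pos hb, List.countP_cons_of_pos (h b (List.mem_cons_self ..) hb)]
        omega
      · rw [List.countP_cons_of_neg hb]
        by_cases hqb : q b = true
        · rw [List.countP_cons_of_pos hqb]; omega
        · rw [List.countP_cons_of_neg hqb]; omega

lemma pvCnt_le_of_subset {g : PySem.Dict Int (List Int)} {vis vis' : PySem.Set Int}
    (h : ∀ x ∈ vis, x ∈ vis') : pvCnt g vis' ≤ pvCnt g vis := by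
  apply List.countP_mono_left
  intro x _ hx
  simp only [Bool.not_eq_eq_eq_not, Bool.not_true, ← Bool.not_eq_true,
    PySem.Set.contains_iff] at hx ⊢
  exact fun hm => hx (h x hm)

lemma pvCnt_lt_add {g : PySem.Dict Int (List Int)} {vis : PySem.Set Int} {n : Int}
    (hk : g.contains n = true) (hn : n ∉ vis) :
    pvCnt g (PySem.Set.add vis n) < pvCnt g vis := by
  refine pvCountP_lt ?_ n ((PySem.Dict.contains_iff_mem_keys g n).1 hk) ?_ ?_
  · intro a _ hp
    simp only [Bool.not_eq_eq_eq_not, Bool.not_true, ← Bool.not_eq_true,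
      PySem.Set.contains_iff, PySem.Set.mem_add] at hp ⊢
    exact fun hm => hp (Or.inl hm)
  · simpa [PySem.Set.contains_iff] using hn
  · simp [PySem.Set.mem_add]

lemma pvCnt_le_keys (g : PySem.Dict Int (List Int)) (vis : PySem.Set Int) :
    pvCnt g vis ≤ g.keys.length := List.countP_le_length ..

lemma pvDfsA_spec (g : PySem.Dict Int (List Int))
    (KC : ∀ x y, y ∈ pvAdj g x → g.contains y = true) :
    ∀ (fuel : Nat) (node : Int) (vis : PySem.Set Int),
    g.contains node = true → node ∉ vis → (∀ x ∈ vis, g.contains x = true) →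
    pvCnt g vis < fuel →
    (∀ x ∈ vis, x ∈ pvDfsA g fuel node vis) ∧
    node ∈ pvDfsA g fuel node vis ∧
    (∀ x ∈ pvDfsA g fuel node vis, x ∈ vis ∨ pvReach g node x) ∧
    (∀ x ∈ pvDfsA g fuel node vis, g.contains x = true) ∧
    (∀ x ∈ pvDfsA g fuel node vis, x ∉ vis → ∀ y ∈ pvAdj g x, y ∈ pvDfsA g fuel node vis) := by
  intro fuel
  induction fuel with
  | zero => intro node vis _ _ _ hcnt; omega
  | succ f ih =>
    intro node vis hnode hnvis hkeys hcnt
    obtain ⟨ns, hns⟩ : ∃ ns, PySem.Dict.get? g node = some ns := by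
      cases h : PySem.Dict.get? g node with
      | none =>
        exfalso
        rw [PySem.Dict.get?_eq_none_iff_contains] at h
        rw [hnode] at h; exact Bool.true_eq_false.mp h
      | some ns => exact ⟨ns, rfl⟩
    have hadj : pvAdj g node = ns := by
      rw [pvAdj, PySem.Dict.getD_eq_get?_getD, hns]; rfl
    have hdfs : pvDfsA g (f + 1) node vis =
        ns.foldl (fun vis nb => if PySem.Set.contains vis nb then vis else pvDfsA g f nb vis)
          (PySem.Set.add vis node) := by
      simp [pvDfsA, hns]
    have hacc0keys : ∀ x ∈ PySem.Set.add vis node, g.contains x = true := by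
      intro x hx
      rcases (PySem.Set.mem_add vis node x).1 hx with h | h
      · exact hkeys x h
      · exact h ▸ hnode
    have hacc0cnt : pvCnt g (PySem.Set.add vis node) < f := by
      have h1 := pvCnt_lt_add hnode hnvis
      omega
    have fold : ∀ (ms : List Int) (acc : PySem.Set Int),
        (∀ n ∈ ms, g.contains n = true ∧ pvReach g node n) →
        (∀ x ∈ acc, g.contains x = true) →
        pvCnt g acc < f →
        (∀ x ∈ acc, x ∈ ms.foldl (fun vis nb => if PySem.Set.contains vis nb then vis else pvDfsA g f nb vis) acc) ∧
        (∀ n ∈ ms, n ∈ ms.foldl (fun vis nb => if PySem.Set.contains vis nb then vis else pvDfsA g f nb vis) acc) ∧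
        (∀ x ∈ ms.foldl (fun vis nb => if PySem.Set.contains vis nb then vis else pvDfsA g f nb vis) acc, x ∈ acc ∨ pvReach g node x) ∧
        (∀ x ∈ ms.foldl (fun vis nb => if PySem.Set.contains vis nb then vis else pvDfsA g f nb vis) acc, g.contains x = true) ∧
        (∀ x ∈ ms.foldl (fun vis nb => if PySem.Set.contains vis nb then vis else pvDfsA g f nb vis) acc, x ∉ acc →
          ∀ y ∈ pvAdj g x, y ∈ ms.foldl (fun vis nb => if PySem.Set.contains vis nb then vis else pvDfsA g f nb vis) acc) := by
      intro ms
      induction ms with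
      | nil =>
        intro acc _ hacck _
        exact ⟨fun x h => h, by simp, fun x hx => Or.inl hx, hacck,
          fun x hx hnx => absurd hx hnx⟩
      | cons n ms ihm =>
        intro acc hms hacck hacccnt
        have hms' : ∀ n' ∈ ms, g.contains n' = true ∧ pvReach g node n' :=
          fun n' hn' => hms n' (List.mem_cons_of_mem _ hn')
        by_cases hn : PySem.Set.contains acc n = true
        · rw [List.foldl_cons, if_pos hn]
          obtain ⟨f1, f2, f3, f4, f5⟩ := ihm acc hms' hacck hacccnt
          refine ⟨f1, ?_, f3, f4, f5⟩
          intro n' hn'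
          rcases List.mem_cons.1 hn' with rfl | hn'
          · exact f1 n' ((PySem.Set.contains_iff acc n').1 hn)
          · exact f2 n' hn'
        · rw [List.foldl_cons, if_neg hn]
          have hnacc : n ∉ acc := fun hmem => hn ((PySem.Set.contains_iff acc n).2 hmem)
          obtain ⟨d1, d2, d3, d4, d5⟩ :=
            ih n acc (hms n (List.mem_cons_self ..)).1 hnacc hacck hacccnt
          obtain ⟨f1, f2, f3, f4, f5⟩ := ihm (pvDfsA g f n acc) hms' d4
            (lt_of_le_of_lt (pvCnt_le_of_subset d1) hacccnt)
          refine ⟨fun x hx => f1 x (d1 x hx), ?_, ?_, f4, ?_⟩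
          · intro n' hn'
            rcases List.mem_cons.1 hn' with rfl | hn'
            · exact f1 n' d2
            · exact f2 n' hn'
          · intro x hx
            rcases f3 x hx with hxr | hre
            · rcases d3 x hxr with hxa | hre
              · exact Or.inl hxa
              · exact Or.inr (Relation.ReflTransGen.trans (hms n (List.mem_cons_self ..)).2 hre)
            · exact Or.inr hre
          · intro x hx hnacc' y hy
            by_cases hxr : x ∈ pvDfsA g f n acc
            · exact f1 y (d5 x hxr hnacc' y hy)
            · exact f5 x hx hxr y hy
    obtain ⟨f1, f2, f3, f4, f5⟩ := fold ns (PySem.Set.add vis node)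
      (fun n hn => ⟨KC node n (hadj ▸ hn), Relation.ReflTransGen.single (hadj ▸ hn)⟩)
      hacc0keys hacc0cnt
    rw [hdfs]
    refine ⟨fun x hx => f1 x ((PySem.Set.mem_add vis node x).2 (Or.inl hx)),
      f1 node ((PySem.Set.mem_add vis node node).2 (Or.inr rfl)), ?_, f4, ?_⟩
    · intro x hx
      rcases f3 x hx with hxa | hre
      · rcases (PySem.Set.mem_add vis node x).1 hxa with h | h
        · exact Or.inl h
        · exact Or.inr (h ▸ Relation.ReflTransGen.refl)
      · exact Or.inr hre
    · intro x hx hxvis y hy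
      by_cases hxa : x ∈ PySem.Set.add vis node
      · have hxn : x = node := by
          rcases (PySem.Set.mem_add vis node x).1 hxa with h | h
          · exact absurd h hxvis
          · exact h
        subst hxn
        rw [hadj] at hy
        exact f2 y hy
      · exact f5 x hx hxa y hy

lemma pvGet?_of_contains (g : PySem.Dict Int (List Int)) (node : Int)
    (h : g.contains node = true) :
    PySem.Dict.get? g node = some (pvAdj g node) := by
  cases hg : PySem.Dict.get? g node with
  | none =>
    exfalso
    rw [PySem.Dict.get?_eq_none_iff_contains] at hg
    rw [h] at hg; exact Bool.true_eq_false.mp hg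
  | some ns =>
    rw [pvAdj, PySem.Dict.getD_eq_get?_getD, hg]; rfl

lemma pvBfsInner_spec : ∀ (ns : List Int) (st : PySem.Set Int × List Int),
    (∀ x ∈ st.1, x ∈ (ns.foldl (fun st nb => if PySem.Set.contains st.1 nb then st else (PySem.Set.add st.1 nb, st.2 ++ [nb])) st).1) ∧
    (∃ new, (ns.foldl (fun st nb => if PySem.Set.contains st.1 nb then st else (PySem.Set.add st.1 nb, st.2 ++ [nb])) st).2 = st.2 ++ new ∧
      (∀ x, x ∈ (ns.foldl (fun st nb => if PySem.Set.contains st.1 nb then st else (PySem.Set.add st.1 nb, st.2 ++ [nb])) st).1 ↔ x ∈ st.1 ∨ x ∈ new) ∧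
      (∀ x ∈ new, x ∈ ns ∧ x ∉ st.1)) ∧
    (∀ n ∈ ns, n ∈ (ns.foldl (fun st nb => if PySem.Set.contains st.1 nb then st else (PySem.Set.add st.1 nb, st.2 ++ [nb])) st).1) := by
  intro ns
  induction ns with
  | nil =>
    intro st
    exact ⟨fun x h => h, ⟨[], by simp, fun x => by simp, by simp⟩, by simp⟩
  | cons n ns ihm =>
    intro st
    by_cases hc : PySem.Set.contains st.1 n = true
    · rw [List.foldl_cons, if_pos hc]
      obtain ⟨a1, ⟨new, hnew, hiff, hprop⟩, a3⟩ := ihm st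
      refine ⟨a1, ⟨new, hnew, hiff, fun x hx => ⟨List.mem_cons_of_mem _ (hprop x hx).1, (hprop x hx).2⟩⟩, ?_⟩
      intro n' hn'
      rcases List.mem_cons.1 hn' with rfl | hn'
      · exact a1 n' ((PySem.Set.contains_iff st.1 n').1 hc)
      · exact a3 n' hn'
    · rw [List.foldl_cons, if_neg hc]
      have hnmem : n ∉ st.1 := fun hm => hc ((PySem.Set.contains_iff st.1 n).2 hm)
      obtain ⟨a1, ⟨new, hnew, hiff, hprop⟩, a3⟩ := ihm (PySem.Set.add st.1 n, st.2 ++ [n])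
      refine ⟨?_, ⟨n :: new, ?_, ?_, ?_⟩, ?_⟩
      · intro x hx
        exact a1 x ((PySem.Set.mem_add st.1 n x).2 (Or.inl hx))
      · rw [hnew]; simp
      · intro x
        rw [hiff]
        simp only [PySem.Set.mem_add, List.mem_cons]
        tauto
      · intro x hx
        rcases List.mem_cons.1 hx with rfl | hx'
        · exact ⟨by simp, hnmem⟩
        · obtain ⟨h1, h2⟩ := hprop x hx'
          exact ⟨List.mem_cons_of_mem _ h1, fun hm => h2 ((PySem.Set.mem_add st.1 n x).2 (Or.inl hm))⟩
      · intro n' hn'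
        rcases List.mem_cons.1 hn' with rfl | hn'
        · exact a1 _ ((PySem.Set.mem_add _ _ _).2 (Or.inr rfl))
        · exact a3 n' hn'

lemma pvBfsRoundAux_spec (g : PySem.Dict Int (List Int))
    (KC : ∀ x y, y ∈ pvAdj g x → g.contains y = true) :
    ∀ (fr : List Int) (st : PySem.Set Int × List Int),
    (∀ n ∈ fr, g.contains n = true) →
    (∀ x ∈ st.1, x ∈ (fr.foldl (fun st node => match PySem.Dict.get? g node with | none => st | some ns => ns.foldl (fun st nb => if PySem.Set.contains st.1 nb then st else (PySem.Set.add st.1 nb, st.2 ++ [nb])) st) st).1) ∧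
    (∃ new, (fr.foldl (fun st node => match PySem.Dict.get? g node with | none => st | some ns => ns.foldl (fun st nb => if PySem.Set.contains st.1 nb then st else (PySem.Set.add st.1 nb, st.2 ++ [nb])) st) st).2 = st.2 ++ new ∧
      (∀ x, x ∈ (fr.foldl (fun st node => match PySem.Dict.get? g node with | none => st | some ns => ns.foldl (fun st nb => if PySem.Set.contains st.1 nb then st else (PySem.Set.add st.1 nb, st.2 ++ [nb])) st) st).1 ↔ x ∈ st.1 ∨ x ∈ new) ∧
      (∀ n ∈ new, n ∉ st.1 ∧ g.contains n = true ∧ ∃ f0 ∈ fr, n ∈ pvAdj g f0)) ∧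
    (∀ f0 ∈ fr, ∀ y ∈ pvAdj g f0, y ∈ (fr.foldl (fun st node => match PySem.Dict.get? g node with | none => st | some ns => ns.foldl (fun st nb => if PySem.Set.contains st.1 nb then st else (PySem.Set.add st.1 nb, st.2 ++ [nb])) st) st).1) := by
  intro fr
  induction fr with
  | nil =>
    intro st _
    exact ⟨fun x h => h, ⟨[], by simp, fun x => by simp, by simp⟩, by simp⟩
  | cons f0 fr ihf =>
    intro st hfr
    have hf0 : g.contains f0 = true := hfr f0 (List.mem_cons_self ..)
    have hfr' : ∀ n ∈ fr, g.contains n = true := fun n hn => hfr n (List.mem_cons_of_mem _ hn)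
    rw [List.foldl_cons, pvGet?_of_contains g f0 hf0]
    obtain ⟨a1, ⟨new1, hnew1, hiff1, hprop1⟩, a3⟩ := pvBfsInner_spec (pvAdj g f0) st
    set st1 := (pvAdj g f0).foldl (fun st nb => if PySem.Set.contains st.1 nb then st else (PySem.Set.add st.1 nb, st.2 ++ [nb])) st with hst1
    obtain ⟨b1, ⟨new2, hnew2, hiff2, hprop2⟩, b3⟩ := ihf st1 hfr'
    refine ⟨fun x hx => b1 x (a1 x hx), ⟨new1 ++ new2, ?_, ?_, ?_⟩, ?_⟩
    · rw [hnew2, hnew1, List.append_assoc]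
    · intro x
      rw [hiff2, hiff1]
      simp only [List.mem_append]
      tauto
    · intro n hn
      rcases List.mem_append.1 hn with hn1 | hn2
      · obtain ⟨hmem, hnst⟩ := hprop1 n hn1
        exact ⟨hnst, KC f0 n hmem, f0, List.mem_cons_self .., hmem⟩
      · obtain ⟨hnst1, hcont, f1, hf1, hmem⟩ := hprop2 n hn2
        exact ⟨fun hm => hnst1 (a1 n hm), hcont, f1, List.mem_cons_of_mem _ hf1, hmem⟩
    · intro f1 hf1 y hy
      rcases List.mem_cons.1 hf1 with rfl | hf1'
      · exact b1 y (a3 y hy)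
      · exact b3 f1 hf1' y hy

lemma pvBfsRound_spec (g : PySem.Dict Int (List Int))
    (KC : ∀ x y, y ∈ pvAdj g x → g.contains y = true) :
    ∀ (frontier : List Int) (vis : PySem.Set Int),
    (∀ n ∈ frontier, g.contains n = true) →
    (∀ x ∈ vis, x ∈ (pvBfsRound g vis frontier).1) ∧
    (∀ x, x ∈ (pvBfsRound g vis frontier).1 ↔ x ∈ vis ∨ x ∈ (pvBfsRound g vis frontier).2) ∧
    (∀ n ∈ (pvBfsRound g vis frontier).2, n ∉ vis ∧ g.contains n = true ∧ ∃ f0 ∈ frontier, n ∈ pvAdj g f0) ∧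
    (∀ f0 ∈ frontier, ∀ y ∈ pvAdj g f0, y ∈ (pvBfsRound g vis frontier).1) := by
  intro frontier vis hfr
  obtain ⟨a1, ⟨new, hnew, hiff, hprop⟩, a3⟩ := pvBfsRoundAux_spec g KC frontier (vis, []) hfr
  rw [pvBfsRound]
  have hnew' : new = (pvBfsRound g vis frontier).2 := by rw [pvBfsRound, hnew]; simp
  refine ⟨a1, ?_, ?_, a3⟩
  · intro x; rw [hiff, hnew']; rfl
  · rw [← pvBfsRound, ← hnew']
    exact hprop

lemma pvBfsLoop_spec (g : PySem.Dict Int (List Int))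
    (KC : ∀ x y, y ∈ pvAdj g x → g.contains y = true) :
    ∀ (fuel : Nat) (vis : PySem.Set Int) (frontier : List Int),
    (∀ x ∈ vis, g.contains x = true) →
    (∀ n ∈ frontier, n ∈ vis) →
    (frontier ≠ [] → pvCnt g vis < fuel) →
    (∀ x ∈ vis, x ∈ frontier ∨ ∀ y ∈ pvAdj g x, y ∈ vis) →
    (∀ x ∈ vis, x ∈ pvBfsLoop g fuel vis frontier) ∧
    (∀ x ∈ pvBfsLoop g fuel vis frontier, x ∈ vis ∨ ∃ n ∈ frontier, pvReach g n x) ∧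
    (∀ x ∈ pvBfsLoop g fuel vis frontier, g.contains x = true) ∧
    (∀ x ∈ pvBfsLoop g fuel vis frontier, ∀ y ∈ pvAdj g x, y ∈ pvBfsLoop g fuel vis frontier) := by
  intro fuel
  induction fuel with
  | zero =>
    intro vis frontier hkeys _ hfuel hcl
    have hfr : frontier = [] := by
      by_contra h
      have := hfuel h
      omega
    subst hfr
    refine ⟨fun x h => h, fun x hx => Or.inl hx, hkeys, ?_⟩
    intro x hx y hy
    rcases hcl x hx with h | h
    · simp at h
    · exact h y hy
  | succ f ihf =>
    intro vis frontier hkeys hfv hfuel hcl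
    by_cases hfe : frontier.isEmpty
    · have hfr : frontier = [] := List.isEmpty_iff.1 hfe
      subst hfr
      rw [pvBfsLoop, if_pos hfe]
      refine ⟨fun x h => h, fun x hx => Or.inl hx, hkeys, ?_⟩
      intro x hx y hy
      rcases hcl x hx with h | h
      · simp at h
      · exact h y hy
    · have hfrne : frontier ≠ [] := fun h => hfe (h ▸ rfl)
      have hV : pvBfsLoop g (f + 1) vis frontier =
          pvBfsLoop g f (pvBfsRound g vis frontier).1 (pvBfsRound g vis frontier).2 := by
        rw [pvBfsLoop, if_neg (by simpa using hfe)]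
      have hfrk : ∀ n ∈ frontier, g.contains n = true := fun n hn => hkeys n (hfv n hn)
      obtain ⟨R1, R2, R3, R4⟩ := pvBfsRound_spec g KC frontier vis hfrk
      have hkeys' : ∀ x ∈ (pvBfsRound g vis frontier).1, g.contains x = true := by
        intro x hx
        rcases (R2 x).1 hx with h | h
        · exact hkeys x h
        · exact (R3 x h).2.1
      have hfv' : ∀ n ∈ (pvBfsRound g vis frontier).2, n ∈ (pvBfsRound g vis frontier).1 :=
        fun n hn => (R2 n).2 (Or.inr hn)
      have hfuel' : (pvBfsRound g vis frontier).2 ≠ [] → pvCnt g (pvBfsRound g vis frontier).1 < f := by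
        intro hne
        obtain ⟨n, hn⟩ := List.exists_mem_of_ne_nil _ hne
        obtain ⟨hnvis, hncont, _⟩ := R3 n hn
        have hsub : ∀ x ∈ PySem.Set.add vis n, x ∈ (pvBfsRound g vis frontier).1 := by
          intro x hx
          rcases (PySem.Set.mem_add vis n x).1 hx with h | h
          · exact R1 x h
          · exact h ▸ hfv' n hn
        have h1 := pvCnt_le_of_subset (g := g) hsub
        have h2 := pvCnt_lt_add hncont hnvis
        have h3 := hfuel hfrne
        omega
      have hcl' : ∀ x ∈ (pvBfsRound g vis frontier).1,
          x ∈ (pvBfsRound g vis frontier).2 ∨ ∀ y ∈ pvAdj g x, y ∈ (pvBfsRound g vis frontier).1 := by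
        intro x hx
        rcases (R2 x).1 hx with h | h
        · rcases hcl x h with hf | hclosed
          · exact Or.inr (R4 x hf)
          · exact Or.inr (fun y hy => R1 y (hclosed y hy))
        · exact Or.inl h
      obtain ⟨L1, L2, L3, L4⟩ := ihf (pvBfsRound g vis frontier).1 (pvBfsRound g vis frontier).2
        hkeys' hfv' hfuel' hcl'
      rw [hV]
      refine ⟨fun x hx => L1 x (R1 x hx), ?_, L3, L4⟩
      intro x hx
      rcases L2 x hx with hr | ⟨n, hn, hre⟩
      · rcases (R2 x).1 hr with h | h
        · exact Or.inl h
        · obtain ⟨_, _, f0, hf0, hmem⟩ := R3 x h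
          exact Or.inr ⟨f0, hf0, Relation.ReflTransGen.single hmem⟩
      · obtain ⟨_, _, f0, hf0, hmem⟩ := R3 n hn
        exact Or.inr ⟨f0, hf0, Relation.ReflTransGen.head hmem hre⟩

lemma pvLoopA_spec (edges : List (Int × Int)) :
    ∀ (ms : List Int) (vis : PySem.Set Int),
    (∀ m ∈ ms, (pvGraph edges).contains m = true) →
    (∀ x ∈ vis, (pvGraph edges).contains x = true) →
    (∀ x ∈ vis, ∀ y ∈ pvAdj (pvGraph edges) x, y ∈ vis) →
    (∀ x ∈ vis, x ∈ ms.foldl (fun vis node => if PySem.Set.contains vis node then vis else pvDfsA (pvGraph edges) (pvFuel edges) node vis) vis) ∧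
    (∀ m ∈ ms, m ∈ ms.foldl (fun vis node => if PySem.Set.contains vis node then vis else pvDfsA (pvGraph edges) (pvFuel edges) node vis) vis) ∧
    (∀ x ∈ ms.foldl (fun vis node => if PySem.Set.contains vis node then vis else pvDfsA (pvGraph edges) (pvFuel edges) node vis) vis, x ∈ vis ∨ ∃ m ∈ ms, pvReach (pvGraph edges) m x) ∧
    (∀ x ∈ ms.foldl (fun vis node => if PySem.Set.contains vis node then vis else pvDfsA (pvGraph edges) (pvFuel edges) node vis) vis, (pvGraph edges).contains x = true) ∧
    (∀ x ∈ ms.foldl (fun vis node => if PySem.Set.contains vis node then vis else pvDfsA (pvGraph edges) (pvFuel edges) node vis) vis, ∀ y ∈ pvAdj (pvGraph edges) x, y ∈ ms.foldl (fun vis node => if PySem.Set.contains vis node then vis else pvDfsA (pvGraph edges) (pvFuel edges) node vis) vis) := by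
  intro ms
  induction ms with
  | nil =>
    intro vis _ hk hcl
    exact ⟨fun x h => h, by simp, fun x hx => Or.inl hx, hk, hcl⟩
  | cons m ms ihm =>
    intro vis hms hk hcl
    have hms' : ∀ m' ∈ ms, (pvGraph edges).contains m' = true :=
      fun m' hm' => hms m' (List.mem_cons_of_mem _ hm')
    by_cases hm : PySem.Set.contains vis m = true
    · rw [List.foldl_cons, if_pos hm]
      obtain ⟨f1, f2, f3, f4, f5⟩ := ihm vis hms' hk hcl
      refine ⟨f1, ?_, ?_, f4, f5⟩
      · intro m' hm'
        rcases List.mem_cons.1 hm' with rfl | hm'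
        · exact f1 _ ((PySem.Set.contains_iff vis _).1 hm)
        · exact f2 m' hm'
      · intro x hx
        rcases f3 x hx with h | ⟨m', hm', hre⟩
        · exact Or.inl h
        · exact Or.inr ⟨m', List.mem_cons_of_mem _ hm', hre⟩
    · rw [List.foldl_cons, if_neg hm]
      have hmvis : m ∉ vis := fun h => hm ((PySem.Set.contains_iff vis m).2 h)
      have hcnt : pvCnt (pvGraph edges) vis < pvFuel edges := by
        have h1 := pvCnt_le_keys (pvGraph edges) vis
        have h2 := pvGraph_keys_len edges
        rw [pvFuel]; omega
      obtain ⟨d1, d2, d3, d4, d5⟩ := pvDfsA_spec (pvGraph edges) (pvGraph_KC edges)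
        (pvFuel edges) m vis (hms m (List.mem_cons_self ..)) hmvis hk hcnt
      have hcl' : ∀ x ∈ pvDfsA (pvGraph edges) (pvFuel edges) m vis,
          ∀ y ∈ pvAdj (pvGraph edges) x, y ∈ pvDfsA (pvGraph edges) (pvFuel edges) m vis := by
        intro x hx y hy
        by_cases hxv : x ∈ vis
        · exact d1 y (hcl x hxv y hy)
        · exact d5 x hx hxv y hy
      obtain ⟨f1, f2, f3, f4, f5⟩ := ihm (pvDfsA (pvGraph edges) (pvFuel edges) m vis) hms' d4 hcl'
      refine ⟨fun x hx => f1 x (d1 x hx), ?_, ?_, f4, f5⟩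
      · intro m' hm'
        rcases List.mem_cons.1 hm' with rfl | hm'
        · exact f1 _ d2
        · exact f2 m' hm'
      · intro x hx
        rcases f3 x hx with hr | ⟨m', hm', hre⟩
        · rcases d3 x hr with h | hre
          · exact Or.inl h
          · exact Or.inr ⟨m, List.mem_cons_self .., hre⟩
        · exact Or.inr ⟨m', List.mem_cons_of_mem _ hm', hre⟩

lemma pvLoopB_spec (edges : List (Int × Int)) :
    ∀ (ms : List Int) (vis : PySem.Set Int),
    (∀ m ∈ ms, (pvGraph edges).contains m = true) →
    (∀ x ∈ vis, (pvGraph edges).contains x = true) →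
    (∀ x ∈ vis, ∀ y ∈ pvAdj (pvGraph edges) x, y ∈ vis) →
    (∀ x ∈ vis, x ∈ ms.foldl (fun vis start => if PySem.Set.contains vis start then vis else pvBfsLoop (pvGraph edges) (pvFuel edges) (PySem.Set.add vis start) [start]) vis) ∧
    (∀ m ∈ ms, m ∈ ms.foldl (fun vis start => if PySem.Set.contains vis start then vis else pvBfsLoop (pvGraph edges) (pvFuel edges) (PySem.Set.add vis start) [start]) vis) ∧
    (∀ x ∈ ms.foldl (fun vis start => if PySem.Set.contains vis start then vis else pvBfsLoop (pvGraph edges) (pvFuel edges) (PySem.Set.add vis start) [start]) vis, x ∈ vis ∨ ∃ m ∈ ms, pvReach (pvGraph edges) m x) ∧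
    (∀ x ∈ ms.foldl (fun vis start => if PySem.Set.contains vis start then vis else pvBfsLoop (pvGraph edges) (pvFuel edges) (PySem.Set.add vis start) [start]) vis, (pvGraph edges).contains x = true) ∧
    (∀ x ∈ ms.foldl (fun vis start => if PySem.Set.contains vis start then vis else pvBfsLoop (pvGraph edges) (pvFuel edges) (PySem.Set.add vis start) [start]) vis, ∀ y ∈ pvAdj (pvGraph edges) x, y ∈ ms.foldl (fun vis start => if PySem.Set.contains vis start then vis else pvBfsLoop (pvGraph edges) (pvFuel edges) (PySem.Set.add vis start) [start]) vis) := by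
  intro ms
  induction ms with
  | nil =>
    intro vis _ hk hcl
    exact ⟨fun x h => h, by simp, fun x hx => Or.inl hx, hk, hcl⟩
  | cons m ms ihm =>
    intro vis hms hk hcl
    have hms' : ∀ m' ∈ ms, (pvGraph edges).contains m' = true :=
      fun m' hm' => hms m' (List.mem_cons_of_mem _ hm')
    by_cases hm : PySem.Set.contains vis m = true
    · rw [List.foldl_cons, if_pos hm]
      obtain ⟨f1, f2, f3, f4, f5⟩ := ihm vis hms' hk hcl
      refine ⟨f1, ?_, ?_, f4, f5⟩
      · intro m' hm'
        rcases List.mem_cons.1 hm' with rfl | hm'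
        · exact f1 _ ((PySem.Set.contains_iff vis _).1 hm)
        · exact f2 m' hm'
      · intro x hx
        rcases f3 x hx with h | ⟨m', hm', hre⟩
        · exact Or.inl h
        · exact Or.inr ⟨m', List.mem_cons_of_mem _ hm', hre⟩
    · rw [List.foldl_cons, if_neg hm]
      have hmc : (pvGraph edges).contains m = true := hms m (List.mem_cons_self ..)
      have hk' : ∀ x ∈ PySem.Set.add vis m, (pvGraph edges).contains x = true := by
        intro x hx
        rcases (PySem.Set.mem_add vis m x).1 hx with h | h
        · exact hk x h
        · exact h ▸ hmc
      have hfv : ∀ n ∈ [m], n ∈ PySem.Set.add vis m := by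
        intro n hn
        rcases List.mem_singleton.1 hn with rfl
        exact (PySem.Set.mem_add vis n n).2 (Or.inr rfl)
      have hfuel : ([m] : List Int) ≠ [] → pvCnt (pvGraph edges) (PySem.Set.add vis m) < pvFuel edges := by
        intro _
        have h1 := pvCnt_le_keys (pvGraph edges) (PySem.Set.add vis m)
        have h2 := pvGraph_keys_len edges
        rw [pvFuel]; omega
      have hcl0 : ∀ x ∈ PySem.Set.add vis m, x ∈ [m] ∨ ∀ y ∈ pvAdj (pvGraph edges) x, y ∈ PySem.Set.add vis m := by
        intro x hx
        rcases (PySem.Set.mem_add vis m x).1 hx with h | h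
        · exact Or.inr (fun y hy => (PySem.Set.mem_add vis m y).2 (Or.inl (hcl x h y hy)))
        · exact Or.inl (h ▸ List.mem_singleton.2 rfl)
      obtain ⟨L1, L2, L3, L4⟩ := pvBfsLoop_spec (pvGraph edges) (pvGraph_KC edges)
        (pvFuel edges) (PySem.Set.add vis m) [m] hk' hfv hfuel hcl0
      obtain ⟨f1, f2, f3, f4, f5⟩ := ihm (pvBfsLoop (pvGraph edges) (pvFuel edges) (PySem.Set.add vis m) [m]) hms' L3 L4
      refine ⟨?_, ?_, ?_, f4, f5⟩
      · intro x hx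
        exact f1 x (L1 x ((PySem.Set.mem_add vis m x).2 (Or.inl hx)))
      · intro m' hm'
        rcases List.mem_cons.1 hm' with rfl | hm'
        · exact f1 _ (L1 _ ((PySem.Set.mem_add vis _ _).2 (Or.inr rfl)))
        · exact f2 m' hm'
      · intro x hx
        rcases f3 x hx with hr | ⟨m', hm', hre⟩
        · rcases L2 x hr with h | ⟨n, hn, hre⟩
          · rcases (PySem.Set.mem_add vis m x).1 h with h' | h'
            · exact Or.inl h'
            · exact Or.inr ⟨m, List.mem_cons_self .., h' ▸ Relation.ReflTransGen.refl⟩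
          · rcases List.mem_singleton.1 hn with rfl
            exact Or.inr ⟨n, List.mem_cons_self .., hre⟩
        · exact Or.inr ⟨m', List.mem_cons_of_mem _ hm', hre⟩

lemma pvVis_char (edges : List (Int × Int)) (mand : List Int)
    (V : PySem.Set Int)
    (h1 : ∀ m ∈ mand, m ∈ V)
    (h2 : ∀ x ∈ V, x ∈ (PySem.Set.empty : PySem.Set Int) ∨ ∃ m ∈ mand, pvReach (pvGraph edges) m x)
    (h3 : ∀ x ∈ V, ∀ y ∈ pvAdj (pvGraph edges) x, y ∈ V) :
    ∀ x, x ∈ V ↔ ∃ m ∈ mand, pvReach (pvGraph edges) m x := by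
  intro x
  constructor
  · intro hx
    rcases h2 x hx with h | h
    · simp [PySem.Set.empty] at h
    · exact h
  · rintro ⟨m, hm, hre⟩
    induction hre with
    | refl => exact h1 m hm
    | tail _ hbc ih => exact h3 _ ih _ hbc


lemma pv_final_eq (edges : List (Int × Int)) (power_nodes_mandatory : List Int) (power_nodes_discretionary : List Int)
    (hpre : ∀ m ∈ power_nodes_mandatory, ∃ e ∈ edges, m = e.1 ∨ m = e.2) :
    remove_trees_where_discretionary_not_connected_to_discretionary_or_mandatory edges power_nodes_mandatory power_nodes_discretionary =
    remove_trees_where_discretionary_not_connected_to_discretionary_or_mandatory_alt edges power_nodes_mandatory power_nodes_discretionary := by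
  have hm : ∀ m ∈ power_nodes_mandatory, (pvGraph edges).contains m = true :=
    fun m hmm => (pvGraph_contains edges m).2 (hpre m hmm)
  have hek : ∀ x ∈ (PySem.Set.empty : PySem.Set Int), (pvGraph edges).contains x = true := by
    intro x hx; simp [PySem.Set.empty] at hx
  have hecl : ∀ x ∈ (PySem.Set.empty : PySem.Set Int), ∀ y ∈ pvAdj (pvGraph edges) x, y ∈ (PySem.Set.empty : PySem.Set Int) := by
    intro x hx; simp [PySem.Set.empty] at hx
  obtain ⟨_, a2, a3, _, a5⟩ := pvLoopA_spec edges power_nodes_mandatory PySem.Set.empty hm hek hecl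
  obtain ⟨_, b2, b3, _, b5⟩ := pvLoopB_spec edges power_nodes_mandatory PySem.Set.empty hm hek hecl
  have charA := pvVis_char edges power_nodes_mandatory _ a2 a3 a5
  have charB := pvVis_char edges power_nodes_mandatory _ b2 b3 b5
  have hmem : ∀ n : Int,
      n ∈ power_nodes_mandatory.foldl (fun vis node => if PySem.Set.contains vis node then vis else pvDfsA (pvGraph edges) (pvFuel edges) node vis) PySem.Set.empty ↔
      n ∈ power_nodes_mandatory.foldl (fun vis start => if PySem.Set.contains vis start then vis else pvBfsLoop (pvGraph edges) (pvFuel edges) (PySem.Set.add vis start) [start]) PySem.Set.empty := by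
    intro n
    rw [charA n, charB n]
  rw [remove_trees_where_discretionary_not_connected_to_discretionary_or_mandatory, remove_trees_where_discretionary_not_connected_to_discretionary_or_mandatory_alt]
  refine List.all_congr rfl ?_
  intro n
  by_cases h : n ∈ power_nodes_mandatory.foldl (fun vis node => if PySem.Set.contains vis node then vis else pvDfsA (pvGraph edges) (pvFuel edges) node vis) PySem.Set.empty
  · rw [(PySem.Set.contains_iff _ _).2 h, (PySem.Set.contains_iff _ _).2 ((hmem n).1 h)]
  · have h' : n ∉ power_nodes_mandatory.foldl (fun vis start => if PySem.Set.contains vis start then vis else pvBfsLoop (pvGraph edges) (pvFuel edges) (PySem.Set.add vis start) [start]) PySem.Set.empty :=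
      fun hh => h ((hmem n).2 hh)
    have e1 : (power_nodes_mandatory.foldl (fun vis node => if PySem.Set.contains vis node then vis else pvDfsA (pvGraph edges) (pvFuel edges) node vis) PySem.Set.empty).contains n = false := by
      cases hc : (power_nodes_mandatory.foldl (fun vis node => if PySem.Set.contains vis node then vis else pvDfsA (pvGraph edges) (pvFuel edges) node vis) PySem.Set.empty).contains n
      · rfl
      · exact absurd ((PySem.Set.contains_iff _ _).1 hc) h
    have e2 : (power_nodes_mandatory.foldl (fun vis start => if PySem.Set.contains vis start then vis else pvBfsLoop (pvGraph edges) (pvFuel edges) (PySem.Set.add vis start) [start]) PySem.Set.empty).contains n = false := by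
      cases hc : (power_nodes_mandatory.foldl (fun vis start => if PySem.Set.contains vis start then vis else pvBfsLoop (pvGraph edges) (pvFuel edges) (PySem.Set.add vis start) [start]) PySem.Set.empty).contains n
      · rfl
      · exact absurd ((PySem.Set.contains_iff _ _).1 hc) h'
    rw [e1, e2]

-- ===== VERDICT (by name: the statement is the Claim_ definition above) =====
theorem remove_trees_where_discretionary_not_connected_to_discretionary_or_mandatory_spec : Claim_equal_remove_trees_where_discretionary_not_connected_to_discretionary_or_mandatory := by
  intro edges power_nodes_mandatory power_nodes_discretionary _ hpre
  unfold Spec_remove_trees_where_discretionary_not_connected_to_discretionary_or_mandatory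
  unfold Pre_remove_trees_where_discretionary_not_connected_to_discretionary_or_mandatory at hpre
  exact pv_final_eq edges power_nodes_mandatory power_nodes_discretionary hpre
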